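-- pv_equiv track=rewrite | github.com/sunmh207/AI-Codereview-Gitlab | biz/utils/ai_ignore.py | _pattern_to_regex
-- ===== SOURCE A (Python) =====
-- from typing import List, Tuple, Optional
--
-- def _pattern_to_regex(pattern: str) -> Optional[str]:
--     """将.gitignore模式转换为正则表达式"""
--     # 特殊处理：空模式
--     if not pattern:
--         return None
--
--     # 转义正则特殊字符
--     regex = ''
--     i = 0
--     n = len(pattern)
--
--     while i < n:
--         c = pattern[i]
--
--         if c == '*':
--             # 处理 ** 递归匹配
--             if i + 1 < n and pattern[i + 1] == '*':
--                 # 处理 /**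
--                 if i + 2 < n and pattern[i + 2] == '/':
--                     regex += r'(?:[^/]+/)*'
--                     i += 3
--                 else:
--                     regex += r'.*'
--                     i += 2
--             else:
--                 regex += r'[^/]*'
--                 i += 1
--         elif c == '?':
--             regex += r'[^/]'
--             i += 1
--         elif c == '[':
--             # 处理字符集
--             j = i + 1
--             if j < n and pattern[j] == '!':
--                 j += 1
--             if j < n and pattern[j] == ']':
--                 j += 1
--             while j < n:
--                 if pattern[j] == ']':
--                     break
--                 j += 1
--
--             if j < n and pattern[j] == ']':
--                 char_class = pattern[i:j + 1]
--                 # 转换字符集为有效正则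
--                 char_class = char_class.replace('\\', '\\\\')
--                 if char_class.startswith('[!'):
--                     char_class = '[^' + char_class[2:]
--                 regex += char_class
--                 i = j + 1
--             else:
--                 regex += r'\['
--                 i += 1
--         elif c in r'.^$+()|{}':
--             regex += '\\' + c
--             i += 1
--         else:
--             regex += c
--             i += 1
--
--     # 处理完整路径匹配
--     if not regex.startswith(r'[^/]*'):
--         # 非绝对路径可以匹配任意层级
--         regex = r'(?:^|/)' + regex
--
--     # 处理结尾
--     if not regex.endswith('/'):
--         regex += r'(?:/.*)?$'
--     else:
--         regex += r'.*$'
--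
--     return regex
-- ===== SOURCE B (Python) =====
-- from typing import Optional, List, Tuple
--
-- # B: two-stage pipeline — tokenize the pattern into an explicit token list
-- # (consuming the string suffix with startswith/partition, no index arithmetic),
-- # then render each token to its regex fragment and join; same anchoring passes.
--
-- _SPECIALS = '.^$+()|{}'
--
-- def _tokenize(s: str) -> List[Tuple[str, str]]:
--     """Split a gitignore pattern into (kind, text) tokens."""
--     toks = []
--     while s:
--         if s.startswith('**/'):
--             toks.append(('rec', ''))
--             s = s[3:]
--         elif s.startswith('**'):
--             toks.append(('any', ''))
--             s = s[2:]
--         elif s.startswith('*'):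
--             toks.append(('seg', ''))
--             s = s[1:]
--         elif s.startswith('?'):
--             toks.append(('one', ''))
--             s = s[1:]
--         elif s.startswith('['):
--             rest = s[1:]
--             neg = rest.startswith('!')
--             if neg:
--                 rest = rest[1:]
--             lead = rest.startswith(']')
--             if lead:
--                 rest = rest[1:]
--             inner, sep, tail = rest.partition(']')
--             if sep:
--                 toks.append(('cls', ('!' if neg else '') + (']' if lead else '') + inner))
--                 s = tail
--             else:
--                 toks.append(('brk', ''))
--                 s = s[1:]
--         else:
--             toks.append(('chr', s[0]))
--             s = s[1:]
--     return toks
--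
-- def _render(tok: Tuple[str, str]) -> str:
--     kind, text = tok
--     if kind == 'rec':
--         return r'(?:[^/]+/)*'
--     if kind == 'any':
--         return r'.*'
--     if kind == 'seg':
--         return r'[^/]*'
--     if kind == 'one':
--         return r'[^/]'
--     if kind == 'cls':
--         body = text.replace('\\', '\\\\')
--         if body.startswith('!'):
--             body = '^' + body[1:]
--         return '[' + body + ']'
--     if kind == 'brk':
--         return r'\['
--     return '\\' + text if text in _SPECIALS else text
--
-- def _pattern_to_regex(pattern: str) -> Optional[str]:
--     if not pattern:
--         return None
--     body = ''.join(map(_render, _tokenize(pattern)))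
--     if not body.startswith(r'[^/]*'):
--         body = r'(?:^|/)' + body
--     body += r'.*$' if body.endswith('/') else r'(?:/.*)?$'
--     return body
-- ===== Notes on version B (the rewrite author's own statement) =====
-- stated objective: alternative
-- what changed: Replaces A's single index-arithmetic while loop that interleaves scanning and regex emission by a two-stage pipeline: a tokenizer that consumes the string suffix with startswith/partition and builds an explicit token list, then a separate render pass mapping each token to its regex fragment joined at the end.
import Mathlib
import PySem

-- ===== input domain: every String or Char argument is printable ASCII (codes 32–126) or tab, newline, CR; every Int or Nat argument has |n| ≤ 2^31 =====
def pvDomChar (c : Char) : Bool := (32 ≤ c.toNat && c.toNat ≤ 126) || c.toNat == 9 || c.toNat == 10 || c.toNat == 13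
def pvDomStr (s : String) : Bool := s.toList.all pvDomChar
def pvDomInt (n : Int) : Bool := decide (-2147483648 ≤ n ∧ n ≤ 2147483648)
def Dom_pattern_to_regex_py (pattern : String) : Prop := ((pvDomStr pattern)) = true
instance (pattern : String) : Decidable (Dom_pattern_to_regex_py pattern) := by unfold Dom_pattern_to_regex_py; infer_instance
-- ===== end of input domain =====

-- B replaces A's single index-driven while loop by a two-stage pipeline: tokenize the
-- pattern into an explicit token list (consuming the suffix with startswith/partition),
-- then render each token to its fragment and join; objective: alternative, same cost.

-- ===== PORT A =====

-- A's inner "while j < n: if pattern[j] == ']': break; j += 1" scan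
def pvAScan (cs : List Char) (n j : Nat) : Nat :=
  if _h : j < n then
    if cs.getD j ' ' = ']' then j else pvAScan cs n (j + 1)
  else j
termination_by n - j

theorem pvAScan_ge (cs : List Char) (n j : Nat) : j ≤ pvAScan cs n j := by
  unfold pvAScan
  split
  · split
    · exact Nat.le_refl _
    · exact Nat.le_trans (Nat.le_succ j) (pvAScan_ge cs n (j + 1))
  · exact Nat.le_refl _
termination_by n - j

-- A's "j = i + 1; if pattern[j] == '!': j += 1; if pattern[j] == ']': j += 1" start of the class scan
def pvAClassStart (cs : List Char) (n i : Nat) : Nat :=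
  let j0 := i + 1
  let j1 := if j0 < n ∧ cs.getD j0 ' ' = '!' then j0 + 1 else j0
  if j1 < n ∧ cs.getD j1 ' ' = ']' then j1 + 1 else j1

theorem pvAClassStart_ge (cs : List Char) (n i : Nat) : i + 1 ≤ pvAClassStart cs n i := by
  simp only [pvAClassStart]
  split <;> split <;> omega

-- A's main while loop; regex is the accumulator, i the index.
-- pattern[i] with 0 ≤ i < n is cs.getD i ' ' (always in range);
-- pattern[i:j+1] with 0 ≤ i ≤ j+1 ≤ n is (cs.drop i).take (j+1-i) (exact: bounds in range).
def pvALoop (cs : List Char) (n i : Nat) (regex : List Char) : List Char :=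
  if _hi : i < n then
    let c := cs.getD i ' '
    if c = '*' then
      if i + 1 < n ∧ cs.getD (i + 1) ' ' = '*' then
        if i + 2 < n ∧ cs.getD (i + 2) ' ' = '/' then
          pvALoop cs n (i + 3) (regex ++ ['(','?',':','[','^','/',']','+','/',')','*'])
        else
          pvALoop cs n (i + 2) (regex ++ ['.','*'])
      else
        pvALoop cs n (i + 1) (regex ++ ['[','^','/',']','*'])
    else if c = '?' then
      pvALoop cs n (i + 1) (regex ++ ['[','^','/',']'])
    else if c = '[' then
      let j := pvAScan cs n (pvAClassStart cs n i)
      if j < n ∧ cs.getD j ' ' = ']' then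
        let cc := (cs.drop i).take (j + 1 - i)
        let cc := PySem.Chars.replace cc ['\\'] ['\\','\\']
        let cc := if PySem.Chars.startswith cc ['[','!'] then '[' :: '^' :: cc.drop 2 else cc
        pvALoop cs n (j + 1) (regex ++ cc)
      else
        pvALoop cs n (i + 1) (regex ++ ['\\','['])
    else if c ∈ ['.','^','$','+','(',')','|','{','}'] then
      pvALoop cs n (i + 1) (regex ++ ['\\', c])
    else
      pvALoop cs n (i + 1) (regex ++ [c])
  else regex
termination_by n - i
decreasing_by
  all_goals first
    | omega
    | (have h1 := pvAClassStart_ge cs n i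
       have h2 := pvAScan_ge cs n (pvAClassStart cs n i)
       omega)

def pattern_to_regex_py (pattern : String) : Option String :=
  let cs := pattern.toList
  if cs = [] then none
  else
    let regex := pvALoop cs cs.length 0 []
    let regex := if PySem.Chars.startswith regex ['[','^','/',']','*'] then regex
                 else ['(','?',':','^','|','/',')'] ++ regex
    let regex := if PySem.Chars.endswith regex ['/'] then regex ++ ['.','*','$']
                 else regex ++ ['(','?',':','/','.','*',')','?','$']
    some (String.ofList regex)

-- ===== PORT B =====

-- port of rest.partition(']') : the split of a string at its first ']' —
-- (before, ']' or '', after); exact for the single-character separator used here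
def pvPartition : List Char → List Char × List Char × List Char
  | [] => ([], [], [])
  | c :: t =>
    if c = ']' then ([], [']'], t)
    else
      let r := pvPartition t
      (c :: r.1, r.2.1, r.2.2)

-- cited by pvTokenize's termination proof
theorem pvPartition_tail_le (t : List Char) : (pvPartition t).2.2.length ≤ t.length := by
  induction t with
  | nil => simp [pvPartition]
  | cons c t ih =>
    by_cases hc : c = ']' <;> simp [pvPartition, hc] <;> omega

-- B's token type: ** / , ** , * , ? , a character class body, a lone '[', a plain char
inductive PvTok
  | tRec | tAny | tSeg | tOne
  | tCls : List Char → PvTok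
  | tBrk
  | tChr : Char → PvTok
deriving DecidableEq, Repr

-- B's _tokenize while loop: consumes the suffix s, appending tokens to toks
def pvTokenize (s : List Char) (toks : List PvTok) : List PvTok :=
  if _h : s = [] then toks
  else if PySem.Chars.startswith s ['*','*','/'] then pvTokenize (s.drop 3) (toks ++ [PvTok.tRec])
  else if PySem.Chars.startswith s ['*','*'] then pvTokenize (s.drop 2) (toks ++ [PvTok.tAny])
  else if PySem.Chars.startswith s ['*'] then pvTokenize (s.drop 1) (toks ++ [PvTok.tSeg])
  else if PySem.Chars.startswith s ['?'] then pvTokenize (s.drop 1) (toks ++ [PvTok.tOne])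
  else if PySem.Chars.startswith s ['['] then
    let rest1 := if PySem.Chars.startswith (s.drop 1) ['!'] then (s.drop 1).drop 1 else s.drop 1
    let rest2 := if PySem.Chars.startswith rest1 [']'] then rest1.drop 1 else rest1
    let p := pvPartition rest2
    if p.2.1 ≠ [] then
      pvTokenize p.2.2
        (toks ++ [PvTok.tCls ((if PySem.Chars.startswith (s.drop 1) ['!'] then ['!'] else []) ++
                              ((if PySem.Chars.startswith rest1 [']'] then [']'] else []) ++ p.1))])
    else pvTokenize (s.drop 1) (toks ++ [PvTok.tBrk])
  else pvTokenize (s.drop 1) (toks ++ [PvTok.tChr (s.headD ' ')])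
termination_by s.length
decreasing_by
  all_goals
    (try simp only [List.length_drop])
    <;> first
      | (have hs : 0 < s.length := List.length_pos_of_ne_nil (by assumption); omega)
      | (have hs : 0 < s.length := List.length_pos_of_ne_nil (by assumption)
         have h2 := pvPartition_tail_le (if PySem.Chars.startswith
             (if PySem.Chars.startswith (s.drop 1) ['!'] then (s.drop 1).drop 1 else s.drop 1) [']']
           then (if PySem.Chars.startswith (s.drop 1) ['!'] then (s.drop 1).drop 1 else s.drop 1).drop 1
           else (if PySem.Chars.startswith (s.drop 1) ['!'] then (s.drop 1).drop 1 else s.drop 1))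
         revert h2
         split <;> split <;> simp only [List.length_drop] <;> omega)

-- B's _render: token → regex fragment ('text in _SPECIALS' for a single char is membership)
def pvRender : PvTok → List Char
  | PvTok.tRec => ['(','?',':','[','^','/',']','+','/',')','*']
  | PvTok.tAny => ['.','*']
  | PvTok.tSeg => ['[','^','/',']','*']
  | PvTok.tOne => ['[','^','/',']']
  | PvTok.tCls t =>
      let body := PySem.Chars.replace t ['\\'] ['\\','\\']
      '[' :: ((if PySem.Chars.startswith body ['!'] then '^' :: body.drop 1 else body) ++ [']'])
  | PvTok.tBrk => ['\\','[']
  | PvTok.tChr c => if c ∈ ['.','^','$','+','(',')','|','{','}'] then ['\\', c] else [c]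

def pattern_to_regex_py_alt (pattern : String) : Option String :=
  let cs := pattern.toList
  if cs = [] then none
  else
    let body := ((pvTokenize cs []).map pvRender).flatten
    let body := if PySem.Chars.startswith body ['[','^','/',']','*'] then body
                else ['(','?',':','^','|','/',')'] ++ body
    let body := if PySem.Chars.endswith body ['/'] then body ++ ['.','*','$']
                else body ++ ['(','?',':','/','.','*',')','?','$']
    some (String.ofList body)

-- ===== PRECONDITION & SPEC =====
def Spec_pattern_to_regex_py (pattern : String) (out : Option String) : Prop := out = pattern_to_regex_py_alt pattern
instance (pattern : String) (out : Option String) : Decidable (Spec_pattern_to_regex_py pattern out) := by unfold Spec_pattern_to_regex_py; infer_instance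

-- ===== CLAIM (what is proved, stated in full; the proofs are below) =====
def Claim_equal_pattern_to_regex_py : Prop := ∀ (pattern : String), Dom_pattern_to_regex_py pattern → Spec_pattern_to_regex_py pattern (pattern_to_regex_py pattern)

-- ===== LEMMAS AND PROOFS =====

-- spec function for Chars.replace with the one-char needle '\'
def pvRep (new : List Char) : List Char → List Char
  | [] => []
  | c :: t => if c = '\\' then new ++ pvRep new t else c :: pvRep new t

theorem pvRep_go (new : List Char) (l : List Char) (fuel : Nat) (acc : List Char)
    (hf : l.length ≤ fuel) :
    PySem.Chars.replace.go ['\\'] new fuel l acc = acc.reverse ++ pvRep new l := by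
  induction l generalizing fuel acc with
  | nil => cases fuel <;> simp [PySem.Chars.replace.go, pvRep]
  | cons c t ih =>
    cases fuel with
    | zero => simp at hf
    | succ f =>
      by_cases hc : c = '\\'
      · subst hc
        have hpre : (['\\'] : List Char).isPrefixOf ('\\' :: t) = true := by
          simp [List.isPrefixOf]
        simp only [PySem.Chars.replace.go, hpre, if_true, List.length_singleton,
          List.drop_succ_cons, List.drop_zero]
        rw [ih f (new.reverse ++ acc) (by simp at hf ⊢; omega)]
        simp [pvRep]
      · have hpre : (['\\'] : List Char).isPrefixOf (c :: t) = false := by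
          simp [List.isPrefixOf, Ne.symm hc]
        simp only [PySem.Chars.replace.go, hpre, Bool.false_eq_true, if_false]
        rw [ih f (c :: acc) (by simp at hf ⊢; omega)]
        simp [pvRep, hc]

theorem pvReplace_eq (new : List Char) (l : List Char) :
    PySem.Chars.replace l ['\\'] new = pvRep new l := by
  simp only [PySem.Chars.replace, List.isEmpty_cons, Bool.false_eq_true, if_false]
  exact pvRep_go new l l.length [] (Nat.le_refl _)

theorem pvRep_append (new a b : List Char) :
    pvRep new (a ++ b) = pvRep new a ++ pvRep new b := by
  induction a with
  | nil => simp [pvRep]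
  | cons c t ih => by_cases hc : c = '\\' <;> simp [pvRep, hc, ih]

theorem pvStarts1 (cs : List Char) (m : Nat) (c : Char) :
    (PySem.Chars.startswith (cs.drop m) [c] = true) ↔ (m < cs.length ∧ cs.getD m ' ' = c) := by
  by_cases h : m < cs.length
  · rw [List.drop_eq_getElem_cons h, List.getD_eq_getElem cs ' ' h]
    constructor
    · intro hh
      simp [PySem.Chars.startswith, List.isPrefixOf] at hh
      exact ⟨h, hh.symm⟩
    · rintro ⟨-, hg⟩
      simp [PySem.Chars.startswith, List.isPrefixOf, hg]
  · rw [List.drop_eq_nil_of_le (by omega)]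
    simp [PySem.Chars.startswith, List.isPrefixOf, h]

theorem pvScan_eq (cs : List Char) (m : Nat) (hm : m ≤ cs.length) :
    pvAScan cs cs.length m = m + (pvPartition (cs.drop m)).1.length := by
  by_cases h : m < cs.length
  · have hd : cs.drop m = cs[m] :: cs.drop (m + 1) := List.drop_eq_getElem_cons h
    have hg : cs.getD m ' ' = cs[m] := List.getD_eq_getElem cs ' ' h
    unfold pvAScan
    rw [dif_pos h, hg, hd]
    by_cases hc : cs[m] = ']'
    · rw [if_pos hc]
      simp [pvPartition, hc]
    · rw [if_neg hc]
      rw [pvScan_eq cs (m + 1) (by omega)]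
      simp only [pvPartition, if_neg hc]
      simp
      omega
  · have hd : cs.drop m = [] := List.drop_eq_nil_of_le (by omega)
    unfold pvAScan
    rw [dif_neg h, hd]
    simp [pvPartition]
termination_by cs.length - m

theorem pvPartition_decomp (t : List Char) :
    t = (pvPartition t).1 ++ (pvPartition t).2.1 ++ (pvPartition t).2.2 ∧
      ((pvPartition t).2.1 = [] ∧ (pvPartition t).2.2 = [] ∨ (pvPartition t).2.1 = [']']) := by
  induction t with
  | nil => simp [pvPartition]
  | cons c t ih =>
    by_cases hc : c = ']'
    · simp [pvPartition, hc]
    · simp only [pvPartition, if_neg hc]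
      refine ⟨by simpa using ih.1, ih.2⟩

-- tokenize is an accumulator loop
theorem pvTok_acc (s : List Char) (toks : List PvTok) :
    pvTokenize s toks = toks ++ pvTokenize s [] := by
  by_cases h0 : s = []
  · rw [pvTokenize.eq_def]; conv_rhs => rw [pvTokenize.eq_def]
    simp [h0]
  · rw [pvTokenize.eq_def]; conv_rhs => rw [pvTokenize.eq_def]
    simp only [dif_neg h0]
    split_ifs <;>
      (rw [pvTok_acc _ (toks ++ [_])]; rw [pvTok_acc _ ([] ++ [_])]; simp)
termination_by s.length
decreasing_by
  all_goals
    have hs : 0 < s.length := List.length_pos_of_ne_nil h0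
  all_goals
    first
      | (simp only [List.length_drop]; omega)
      | (have h2 := pvPartition_tail_le (List.drop 1 (List.drop 1 (List.drop 1 s)))
         simp only [List.length_drop] at h2 ⊢; omega)
      | (have h2 := pvPartition_tail_le (List.drop 1 (List.drop 1 s))
         simp only [List.length_drop] at h2 ⊢; omega)
      | (have h2 := pvPartition_tail_le (List.drop 1 s)
         simp only [List.length_drop] at h2 ⊢; omega)

-- the class branch of the two programs agree
theorem pvRep_wrap (new body : List Char) :
    pvRep new ('[' :: (body ++ [']'])) = '[' :: (pvRep new body ++ [']']) := by
  have h1 : pvRep new ['['] = ['['] := by simp [pvRep]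
  have h2 : pvRep new [']'] = [']'] := by simp [pvRep]
  have := pvRep_append new ['['] (body ++ [']'])
  simp only [List.cons_append, List.nil_append] at this
  rw [this, h1, pvRep_append new body [']'], h2]
  simp

theorem pvClassCore (cs : List Char) (i m : Nat) (extras regex : List Char)
    (_hi : i < cs.length) (hm1 : m = i + 1 + extras.length) (hm : m ≤ cs.length)
    (hdropi0 : cs.drop i = ('[' :: extras) ++ cs.drop m)
    (IH : ∀ j, i < j → ∀ rg, pvALoop cs cs.length j rg =
            rg ++ ((pvTokenize (cs.drop j) []).map pvRender).flatten) :
    (if pvAScan cs cs.length m < cs.length ∧ cs.getD (pvAScan cs cs.length m) ' ' = ']' then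
       pvALoop cs cs.length (pvAScan cs cs.length m + 1)
         (regex ++
           (if PySem.Chars.startswith
                 (PySem.Chars.replace ((cs.drop i).take (pvAScan cs cs.length m + 1 - i)) ['\\'] ['\\','\\'])
                 ['[','!'] then
              '[' :: '^' ::
                (PySem.Chars.replace ((cs.drop i).take (pvAScan cs cs.length m + 1 - i)) ['\\'] ['\\','\\']).drop 2
            else
              PySem.Chars.replace ((cs.drop i).take (pvAScan cs cs.length m + 1 - i)) ['\\'] ['\\','\\']))
     else pvALoop cs cs.length (i + 1) (regex ++ ['\\','['])) =
    regex ++ (if (pvPartition (cs.drop m)).2.1 ≠ [] then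
       pvRender (PvTok.tCls (extras ++ (pvPartition (cs.drop m)).1)) ++
         ((pvTokenize (pvPartition (cs.drop m)).2.2 []).map pvRender).flatten
     else ['\\','['] ++ ((pvTokenize (cs.drop (i + 1)) []).map pvRender).flatten) := by
  obtain ⟨hdec, hsep⟩ := pvPartition_decomp (cs.drop m)
  have hscan := pvScan_eq cs m hm
  rcases hsep with ⟨hs1, hs2⟩ | hs
  · -- no closing ']' : both take the '\[' path
    have hb : (pvPartition (cs.drop m)).1 = cs.drop m := by
      conv_rhs => rw [hdec]
      simp [hs1, hs2]
    have hlen : (pvPartition (cs.drop m)).1.length = cs.length - m := by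
      rw [hb, List.length_drop]
    have hjn : pvAScan cs cs.length m = cs.length := by omega
    have hnf : ¬ (pvAScan cs cs.length m < cs.length ∧
        cs.getD (pvAScan cs cs.length m) ' ' = ']') := by
      rw [hjn]; simp
    rw [if_neg hnf]
    conv_rhs => rw [if_neg (show ¬ (pvPartition (cs.drop m)).2.1 ≠ [] by simp [hs1])]
    rw [IH (i + 1) (by omega)]
    simp
  · -- closing ']' found
    set b := (pvPartition (cs.drop m)).1 with hbdef
    set a := (pvPartition (cs.drop m)).2.2 with hadef
    have hdec' : cs.drop m = b ++ ']' :: a := by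
      rw [hdec, hs]; simp
    have hlen : cs.length - m = b.length + 1 + a.length := by
      have := congrArg List.length hdec'
      simp at this
      omega
    have hj : pvAScan cs cs.length m = m + b.length := hscan
    have hjlt : m + b.length < cs.length := by omega
    have hgj : cs.getD (m + b.length) ' ' = ']' := by
      rw [List.getD_eq_getElem cs ' ' hjlt]
      have h1 : cs[m + b.length] = (cs.drop m)[b.length]'(by rw [List.length_drop]; omega) := by
        rw [List.getElem_drop]
      rw [h1]
      have h2 : (cs.drop m)[b.length]'(by rw [List.length_drop]; omega) = (b ++ ']' :: a)[b.length]'(by simp) := by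
        congr 1
      rw [h2, List.getElem_append_right (Nat.le_refl _)]
      simp
    have hcond : pvAScan cs cs.length m < cs.length ∧
        cs.getD (pvAScan cs cs.length m) ' ' = ']' := by rw [hj]; exact ⟨hjlt, hgj⟩
    have hsne : (pvPartition (cs.drop m)).2.1 ≠ [] := by simp [hs]
    rw [if_pos hcond]
    conv_rhs => rw [if_pos hsne]
    -- the slice pattern[i:j+1]
    have hpre : cs.drop i = ('[' :: ((extras ++ b) ++ [']'])) ++ a := by
      rw [hdropi0, hdec']; simp
    have htake : (cs.drop i).take (pvAScan cs cs.length m + 1 - i) =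
        '[' :: ((extras ++ b) ++ [']']) := by
      rw [hpre, hj]
      rw [List.take_left' (by simp; omega)]
    rw [htake, pvReplace_eq, pvRep_wrap]
    -- the remaining suffix (kept)
    have hdropj : cs.drop (m + b.length + 1) = a := by
      have hd1 : cs.drop (m + b.length + 1) = (cs.drop m).drop (b.length + 1) := by
        rw [List.drop_drop]; ring_nf
      rw [hd1, hdec']
      rw [show b ++ ']' :: a = (b ++ [']']) ++ a by simp,
          show b.length + 1 = (b ++ [']']).length by simp,
          List.drop_left]
    -- fragment equality
    have hfrag : (if PySem.Chars.startswith ('[' :: (pvRep ['\\','\\'] (extras ++ b) ++ [']'])) ['[','!']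
          then '[' :: '^' :: ('[' :: (pvRep ['\\','\\'] (extras ++ b) ++ [']'])).drop 2
          else '[' :: (pvRep ['\\','\\'] (extras ++ b) ++ [']'])) =
        pvRender (PvTok.tCls (extras ++ b)) := by
      simp only [pvRender, pvReplace_eq]
      cases hrb : pvRep ['\\','\\'] (extras ++ b) with
      | nil => simp [PySem.Chars.startswith, List.isPrefixOf]
      | cons c t =>
        by_cases hc : c = '!'
        · subst hc
          simp [PySem.Chars.startswith, List.isPrefixOf]
        · simp [PySem.Chars.startswith, List.isPrefixOf, Ne.symm hc]
    rw [hfrag, hj, IH (m + b.length + 1) (by omega), hdropj]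
    simp

theorem pvDropDrop (cs : List Char) (i k : Nat) : (cs.drop i).drop k = cs.drop (i + k) := by
  rw [List.drop_drop]; try congr 1; try omega

theorem pv_key (cs : List Char) (i : Nat) (_hn : i ≤ cs.length) (regex : List Char) :
    pvALoop cs cs.length i regex = regex ++ ((pvTokenize (cs.drop i) []).map pvRender).flatten := by
  by_cases hi : i < cs.length
  · have hdrop : cs.drop i = cs[i] :: cs.drop (i + 1) := List.drop_eq_getElem_cons hi
    have hne : cs.drop i ≠ [] := by simp only [ne_eq, List.drop_eq_nil_iff]; omega
    have hgetD : cs.getD i ' ' = cs[i] := List.getD_eq_getElem cs ' ' hi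
    have hopt0 : cs[i]?.getD ' ' = cs[i] := by rw [List.getElem?_eq_getElem hi]; rfl
    have IH : ∀ j, i < j → ∀ rg, pvALoop cs cs.length j rg =
        rg ++ ((pvTokenize (cs.drop j) []).map pvRender).flatten :=
      fun j hj rg => if hjn : j ≤ cs.length then pv_key cs j hjn rg else by
        have hdj : cs.drop j = [] := List.drop_eq_nil_of_le (by omega)
        rw [pvALoop.eq_def, dif_neg (by omega), hdj, pvTokenize.eq_def]
        simp
    conv_lhs => rw [pvALoop.eq_def]
    rw [dif_pos hi]
    by_cases hc1 : cs[i] = '*'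
    · by_cases h1n : i + 1 < cs.length
      · have hd1 : cs.drop (i + 1) = cs[i + 1] :: cs.drop (i + 2) := List.drop_eq_getElem_cons h1n
        have hopt1 : cs[i + 1]?.getD ' ' = cs[i + 1] := by rw [List.getElem?_eq_getElem h1n]; rfl
        by_cases hc2 : cs[i + 1] = '*'
        · by_cases h2n : i + 2 < cs.length
          · have hd2 : cs.drop (i + 2) = cs[i + 2] :: cs.drop (i + 3) := List.drop_eq_getElem_cons h2n
            have hopt2 : cs[i + 2]?.getD ' ' = cs[i + 2] := by rw [List.getElem?_eq_getElem h2n]; rfl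
            by_cases hc3 : cs[i + 2] = '/'
            · have hG1 : PySem.Chars.startswith (cs.drop i) ['*','*','/'] = true := by
                rw [hdrop, hd1, hd2, hc1, hc2, hc3]; simp [PySem.Chars.startswith, List.isPrefixOf]
              have hTok : pvTokenize (cs.drop i) [] = PvTok.tRec :: pvTokenize (cs.drop (i + 3)) [] := by
                rw [pvTokenize.eq_def, dif_neg hne, if_pos hG1, pvDropDrop, pvTok_acc]
                simp
              simp [hopt0, hc1, hc2, hc3, h1n, h2n]
              rw [hTok, IH (i + 3) (by omega)]
              simp [pvRender]
            · have hG1 : PySem.Chars.startswith (cs.drop i) ['*','*','/'] = false := by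
                rw [hdrop, hd1, hd2, hc1, hc2]
                simp [PySem.Chars.startswith, List.isPrefixOf, Ne.symm hc3]
              have hG2 : PySem.Chars.startswith (cs.drop i) ['*','*'] = true := by
                rw [hdrop, hd1, hc1, hc2]; simp [PySem.Chars.startswith, List.isPrefixOf]
              have hTok : pvTokenize (cs.drop i) [] = PvTok.tAny :: pvTokenize (cs.drop (i + 2)) [] := by
                rw [pvTokenize.eq_def, dif_neg hne, if_neg (by rw [hG1]; simp), if_pos hG2,
                  pvDropDrop, pvTok_acc]
                simp
              simp [hopt0, hc1, hc2, hc3, h1n, h2n]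
              rw [hTok, IH (i + 2) (by omega)]
              simp [pvRender]
          · have hd2e : cs.drop (i + 2) = [] := List.drop_eq_nil_of_le (by omega)
            have hG1 : PySem.Chars.startswith (cs.drop i) ['*','*','/'] = false := by
              rw [hdrop, hd1, hd2e, hc1, hc2]; simp [PySem.Chars.startswith, List.isPrefixOf]
            have hG2 : PySem.Chars.startswith (cs.drop i) ['*','*'] = true := by
              rw [hdrop, hd1, hc1, hc2]; simp [PySem.Chars.startswith, List.isPrefixOf]
            have hTok : pvTokenize (cs.drop i) [] = PvTok.tAny :: pvTokenize (cs.drop (i + 2)) [] := by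
              rw [pvTokenize.eq_def, dif_neg hne, if_neg (by rw [hG1]; simp), if_pos hG2,
                pvDropDrop, pvTok_acc]
              simp
            simp [hopt0, hc1, hc2, h1n, h2n]
            rw [hTok, IH (i + 2) (by omega)]
            simp [pvRender]
        · have hG1 : PySem.Chars.startswith (cs.drop i) ['*','*','/'] = false := by
            rw [hdrop, hd1, hc1]
            simp [PySem.Chars.startswith, List.isPrefixOf, Ne.symm hc2]
          have hG2 : PySem.Chars.startswith (cs.drop i) ['*','*'] = false := by
            rw [hdrop, hd1, hc1]
            simp [PySem.Chars.startswith, List.isPrefixOf, Ne.symm hc2]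
          have hG3 : PySem.Chars.startswith (cs.drop i) ['*'] = true := by
            rw [hdrop, hc1]; simp [PySem.Chars.startswith, List.isPrefixOf]
          have hTok : pvTokenize (cs.drop i) [] = PvTok.tSeg :: pvTokenize (cs.drop (i + 1)) [] := by
            rw [pvTokenize.eq_def, dif_neg hne, if_neg (by rw [hG1]; simp),
              if_neg (by rw [hG2]; simp), if_pos hG3, pvDropDrop, pvTok_acc]
            simp
          simp [hopt0, hc1, hc2, h1n]
          rw [hTok, IH (i + 1) (by omega)]
          simp [pvRender]
      · have hd1e : cs.drop (i + 1) = [] := List.drop_eq_nil_of_le (by omega)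
        have hG1 : PySem.Chars.startswith (cs.drop i) ['*','*','/'] = false := by
          rw [hdrop, hd1e, hc1]; simp [PySem.Chars.startswith, List.isPrefixOf]
        have hG2 : PySem.Chars.startswith (cs.drop i) ['*','*'] = false := by
          rw [hdrop, hd1e, hc1]; simp [PySem.Chars.startswith, List.isPrefixOf]
        have hG3 : PySem.Chars.startswith (cs.drop i) ['*'] = true := by
          rw [hdrop, hc1]; simp [PySem.Chars.startswith, List.isPrefixOf]
        have hTok : pvTokenize (cs.drop i) [] = PvTok.tSeg :: pvTokenize (cs.drop (i + 1)) [] := by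
          rw [pvTokenize.eq_def, dif_neg hne, if_neg (by rw [hG1]; simp),
            if_neg (by rw [hG2]; simp), if_pos hG3, pvDropDrop, pvTok_acc]
          simp
        simp [hopt0, hc1, h1n]
        rw [hTok, IH (i + 1) (by omega)]
        simp [pvRender]
    · have hG1 : PySem.Chars.startswith (cs.drop i) ['*','*','/'] = false := by
        rw [hdrop]; simp [PySem.Chars.startswith, List.isPrefixOf, Ne.symm hc1]
      have hG2 : PySem.Chars.startswith (cs.drop i) ['*','*'] = false := by
        rw [hdrop]; simp [PySem.Chars.startswith, List.isPrefixOf, Ne.symm hc1]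
      have hG3 : PySem.Chars.startswith (cs.drop i) ['*'] = false := by
        rw [hdrop]; simp [PySem.Chars.startswith, List.isPrefixOf, Ne.symm hc1]
      by_cases hcq : cs[i] = '?'
      · have hG4 : PySem.Chars.startswith (cs.drop i) ['?'] = true := by
          rw [hdrop, hcq]; simp [PySem.Chars.startswith, List.isPrefixOf]
        have hTok : pvTokenize (cs.drop i) [] = PvTok.tOne :: pvTokenize (cs.drop (i + 1)) [] := by
          rw [pvTokenize.eq_def, dif_neg hne, if_neg (by rw [hG1]; simp),
            if_neg (by rw [hG2]; simp), if_neg (by rw [hG3]; simp), if_pos hG4,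
            pvDropDrop, pvTok_acc]
          simp
        simp [hopt0, hcq]
        rw [hTok, IH (i + 1) (by omega)]
        simp [pvRender]
      · have hG4 : PySem.Chars.startswith (cs.drop i) ['?'] = false := by
          rw [hdrop]; simp [PySem.Chars.startswith, List.isPrefixOf, Ne.symm hcq]
        by_cases hcb : cs[i] = '['
        · -- character-class branch
          have hG5 : PySem.Chars.startswith (cs.drop i) ['['] = true := by
            rw [hdrop, hcb]; simp [PySem.Chars.startswith, List.isPrefixOf]
          have hd1 : (cs.drop i).drop 1 = cs.drop (i + 1) := pvDropDrop cs i 1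
          have hd12 : (cs.drop (i + 1)).drop 1 = cs.drop (i + 2) := pvDropDrop cs (i + 1) 1
          have hd23 : (cs.drop (i + 2)).drop 1 = cs.drop (i + 3) := pvDropDrop cs (i + 2) 1
          simp only [hgetD, hcb, hG5, reduceIte]
          by_cases hx1 : i + 1 < cs.length ∧ cs.getD (i + 1) ' ' = '!'
          · have e1 : PySem.Chars.startswith (cs.drop (i + 1)) ['!'] = true :=
              (pvStarts1 cs (i + 1) '!').mpr hx1
            have hdx1 : cs.drop (i + 1) = '!' :: cs.drop (i + 2) := by
              rw [List.drop_eq_getElem_cons hx1.1]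
              rw [← List.getD_eq_getElem cs ' ' hx1.1, hx1.2]
            by_cases hx2 : i + 2 < cs.length ∧ cs.getD (i + 2) ' ' = ']'
            · have e2 : PySem.Chars.startswith (cs.drop (i + 2)) [']'] = true :=
                (pvStarts1 cs (i + 2) ']').mpr hx2
              have hdx2 : cs.drop (i + 2) = ']' :: cs.drop (i + 3) := by
                rw [List.drop_eq_getElem_cons hx2.1]
                rw [← List.getD_eq_getElem cs ' ' hx2.1, hx2.2]
              have hstart : pvAClassStart cs cs.length i = i + 3 := by
                simp only [pvAClassStart]
                rw [if_pos hx1]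
                have h12 : i + 1 + 1 = i + 2 := rfl
                rw [h12, if_pos hx2]
              have hTokC : ((pvTokenize (cs.drop i) []).map pvRender).flatten =
                  (if (pvPartition (cs.drop (i + 3))).2.1 ≠ [] then
                     pvRender (PvTok.tCls (['!',']'] ++ (pvPartition (cs.drop (i + 3))).1)) ++
                       ((pvTokenize (pvPartition (cs.drop (i + 3))).2.2 []).map pvRender).flatten
                   else ['\\','['] ++ ((pvTokenize (cs.drop (i + 1)) []).map pvRender).flatten) := by
                rw [pvTokenize.eq_def, dif_neg hne, if_neg (by rw [hG1]; simp),
                  if_neg (by rw [hG2]; simp), if_neg (by rw [hG3]; simp),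
                  if_neg (by rw [hG4]; simp), if_pos hG5]
                simp only [hd1, hd12, hd23, e1, e2, Bool.false_eq_true, eq_self_iff_true, if_true, if_false, reduceIte]
                by_cases hp : (pvPartition (cs.drop (i + 3))).2.1 ≠ []
                · rw [if_pos hp, if_pos hp, pvTok_acc]
                  simp [pvRender]
                · rw [if_neg hp, if_neg hp, pvTok_acc]
                  simp [pvRender]
              rw [hTokC, hstart]
              exact pvClassCore cs i (i + 3) ['!',']'] regex hi (by simp) (by omega)
                (by rw [hdrop, hcb, hdx1, hdx2]; simp) IH
            · have e2 : PySem.Chars.startswith (cs.drop (i + 2)) [']'] = false := by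
                rw [Bool.eq_false_iff]
                intro h; exact hx2 ((pvStarts1 cs (i + 2) ']').mp h)
              have hstart : pvAClassStart cs cs.length i = i + 2 := by
                simp only [pvAClassStart]
                rw [if_pos hx1]
                have h12 : i + 1 + 1 = i + 2 := rfl
                rw [h12, if_neg hx2]
              have hTokC : ((pvTokenize (cs.drop i) []).map pvRender).flatten =
                  (if (pvPartition (cs.drop (i + 2))).2.1 ≠ [] then
                     pvRender (PvTok.tCls (['!'] ++ (pvPartition (cs.drop (i + 2))).1)) ++
                       ((pvTokenize (pvPartition (cs.drop (i + 2))).2.2 []).map pvRender).flatten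
                   else ['\\','['] ++ ((pvTokenize (cs.drop (i + 1)) []).map pvRender).flatten) := by
                rw [pvTokenize.eq_def, dif_neg hne, if_neg (by rw [hG1]; simp),
                  if_neg (by rw [hG2]; simp), if_neg (by rw [hG3]; simp),
                  if_neg (by rw [hG4]; simp), if_pos hG5]
                simp only [hd1, hd12, hd23, e1, e2, Bool.false_eq_true, eq_self_iff_true, if_true, if_false, reduceIte]
                by_cases hp : (pvPartition (cs.drop (i + 2))).2.1 ≠ []
                · rw [if_pos hp, if_pos hp, pvTok_acc]
                  simp [pvRender]
                · rw [if_neg hp, if_neg hp, pvTok_acc]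
                  simp [pvRender]
              rw [hTokC, hstart]
              exact pvClassCore cs i (i + 2) ['!'] regex hi (by simp) (by omega)
                (by rw [hdrop, hcb, hdx1]; simp) IH
          · have e1 : PySem.Chars.startswith (cs.drop (i + 1)) ['!'] = false := by
              rw [Bool.eq_false_iff]
              intro h; exact hx1 ((pvStarts1 cs (i + 1) '!').mp h)
            by_cases hx2 : i + 1 < cs.length ∧ cs.getD (i + 1) ' ' = ']'
            · have e2 : PySem.Chars.startswith (cs.drop (i + 1)) [']'] = true :=
                (pvStarts1 cs (i + 1) ']').mpr hx2
              have hdx2 : cs.drop (i + 1) = ']' :: cs.drop (i + 2) := by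
                rw [List.drop_eq_getElem_cons hx2.1]
                rw [← List.getD_eq_getElem cs ' ' hx2.1, hx2.2]
              have hstart : pvAClassStart cs cs.length i = i + 2 := by
                simp only [pvAClassStart]
                rw [if_neg hx1, if_pos hx2]
              have hTokC : ((pvTokenize (cs.drop i) []).map pvRender).flatten =
                  (if (pvPartition (cs.drop (i + 2))).2.1 ≠ [] then
                     pvRender (PvTok.tCls ([']'] ++ (pvPartition (cs.drop (i + 2))).1)) ++
                       ((pvTokenize (pvPartition (cs.drop (i + 2))).2.2 []).map pvRender).flatten
                   else ['\\','['] ++ ((pvTokenize (cs.drop (i + 1)) []).map pvRender).flatten) := by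
                rw [pvTokenize.eq_def, dif_neg hne, if_neg (by rw [hG1]; simp),
                  if_neg (by rw [hG2]; simp), if_neg (by rw [hG3]; simp),
                  if_neg (by rw [hG4]; simp), if_pos hG5]
                simp only [hd1, hd12, hd23, e1, e2, Bool.false_eq_true, eq_self_iff_true, if_true, if_false, reduceIte]
                by_cases hp : (pvPartition (cs.drop (i + 2))).2.1 ≠ []
                · rw [if_pos hp, if_pos hp, pvTok_acc]
                  simp [pvRender]
                · rw [if_neg hp, if_neg hp, pvTok_acc]
                  simp [pvRender]
              rw [hTokC, hstart]
              exact pvClassCore cs i (i + 2) [']'] regex hi (by simp) (by omega)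
                (by rw [hdrop, hcb, hdx2]; simp) IH
            · have e2 : PySem.Chars.startswith (cs.drop (i + 1)) [']'] = false := by
                rw [Bool.eq_false_iff]
                intro h; exact hx2 ((pvStarts1 cs (i + 1) ']').mp h)
              have hstart : pvAClassStart cs cs.length i = i + 1 := by
                simp only [pvAClassStart]
                rw [if_neg hx1, if_neg hx2]
              have hTokC : ((pvTokenize (cs.drop i) []).map pvRender).flatten =
                  (if (pvPartition (cs.drop (i + 1))).2.1 ≠ [] then
                     pvRender (PvTok.tCls ([] ++ (pvPartition (cs.drop (i + 1))).1)) ++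
                       ((pvTokenize (pvPartition (cs.drop (i + 1))).2.2 []).map pvRender).flatten
                   else ['\\','['] ++ ((pvTokenize (cs.drop (i + 1)) []).map pvRender).flatten) := by
                rw [pvTokenize.eq_def, dif_neg hne, if_neg (by rw [hG1]; simp),
                  if_neg (by rw [hG2]; simp), if_neg (by rw [hG3]; simp),
                  if_neg (by rw [hG4]; simp), if_pos hG5]
                simp only [hd1, hd12, hd23, e1, e2, Bool.false_eq_true, eq_self_iff_true, if_true, if_false, reduceIte]
                by_cases hp : (pvPartition (cs.drop (i + 1))).2.1 ≠ []
                · rw [if_pos hp, if_pos hp, pvTok_acc]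
                  simp [pvRender]
                · rw [if_neg hp, if_neg hp, pvTok_acc]
                  simp [pvRender]
              rw [hTokC, hstart]
              exact pvClassCore cs i (i + 1) [] regex hi (by simp) (by omega)
                (by rw [hdrop, hcb]; simp) IH
        · -- plain character (escaped or not)
          have hG5 : PySem.Chars.startswith (cs.drop i) ['['] = false := by
            rw [hdrop]; simp [PySem.Chars.startswith, List.isPrefixOf, Ne.symm hcb]
          have hhead : (cs.drop i).headD ' ' = cs[i] := by rw [hdrop]; simp [hopt0]
          have hTok : pvTokenize (cs.drop i) [] =
              PvTok.tChr cs[i] :: pvTokenize (cs.drop (i + 1)) [] := by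
            rw [pvTokenize.eq_def, dif_neg hne, if_neg (by rw [hG1]; simp),
              if_neg (by rw [hG2]; simp), if_neg (by rw [hG3]; simp),
              if_neg (by rw [hG4]; simp), if_neg (by rw [hG5]; simp),
              hhead, pvDropDrop, pvTok_acc]
            simp
          by_cases hmem : cs[i] ∈ ['.','^','$','+','(',')','|','{','}']
          · simp [hopt0, hc1, hcq, hcb, hmem]
            rw [hTok, IH (i + 1) (by omega)]
            simp [pvRender, hmem]
          · simp [hopt0, hc1, hcq, hcb, hmem]
            rw [hTok, IH (i + 1) (by omega)]
            simp [pvRender, hmem]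
  · have hdj : cs.drop i = [] := List.drop_eq_nil_of_le (by omega)
    rw [pvALoop.eq_def, dif_neg hi, hdj, pvTokenize.eq_def]
    simp
termination_by cs.length - i
decreasing_by omega

-- ===== VERDICT (by name: the statement is the Claim_ definition above) =====
theorem pattern_to_regex_py_spec : Claim_equal_pattern_to_regex_py := by
  unfold Claim_equal_pattern_to_regex_py Spec_pattern_to_regex_py
  intro pattern _
  unfold pattern_to_regex_py pattern_to_regex_py_alt
  simp only [pv_key pattern.toList 0 (Nat.zero_le _) [], List.drop_zero, List.nil_append]
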